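-- pv_equiv track=rewrite | github.com/Lucifer90/netflixController | resources/netflixnotifier/src/formatter_logs.py | set_underscore_position
-- ===== SOURCE A (Python) =====
-- def set_underscore_position(name):
--     """
--     Imposta la posizione dell'underscore che indica l'eventuale ripetizione di un file di log.
--     Scorre la stringa al contrario, se incontra un - PRIMA di un _ significa che non ci sono state ripetizioni di nome.
--     :param name: nome candidato.
--     :return: ritorna la posizione dell'eventuale underscore
--     """
--     idx = 0
--     for c in name[::-1]:
--         idx += 1
--         if c == '-':
--             return 0
--         elif c == '_':
--             result = len(name)-idx
--             return result
-- ===== SOURCE B (Python) =====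
-- def set_underscore_position(name):
--     u = name.rfind('_')
--     d = name.rfind('-')
--     if u == -1 and d == -1:
--         return None
--     return u if u > d else 0
-- ===== Notes on version B (the rewrite author's own statement) =====
-- stated objective: idiomatic
-- what changed: Replaces the explicit reversed-string scan with two str.rfind lookups and a single comparison (last '_' index vs last '-' index), with no Python-level loop.
import Mathlib
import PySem

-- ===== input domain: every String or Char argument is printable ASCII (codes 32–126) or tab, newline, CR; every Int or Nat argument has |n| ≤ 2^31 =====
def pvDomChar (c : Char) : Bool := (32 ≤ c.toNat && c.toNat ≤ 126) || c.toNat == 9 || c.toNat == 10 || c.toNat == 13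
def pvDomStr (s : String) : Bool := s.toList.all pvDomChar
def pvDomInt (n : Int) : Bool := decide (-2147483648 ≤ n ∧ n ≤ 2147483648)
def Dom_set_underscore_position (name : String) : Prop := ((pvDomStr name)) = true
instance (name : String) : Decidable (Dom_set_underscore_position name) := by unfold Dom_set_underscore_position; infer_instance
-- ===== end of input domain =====

-- B replaces A's explicit reversed-string scan with two rfind lookups and one comparison (idiomatic; same behaviour).


-- ===== PORT A =====
-- the loop body: 'idx += 1; if c == '-': return 0; elif c == '_': return len(name)-idx'
def spLoopA (n : Int) (idx : Int) : List Char → Option Int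
  | [] => none
  | c :: rest =>
      if c = '-' then some 0
      else if c = '_' then some (n - (idx + 1))
      else spLoopA n (idx + 1) rest

-- 'for c in name[::-1]' iterates the code points in reverse (PySem.Str.slice?_none_none_neg_one)
def set_underscore_position (name : String) : Option Int :=
  spLoopA (PySem.Str.len name) 0 name.toList.reverse

-- ===== PORT B =====
def set_underscore_position_alt (name : String) : Option Int :=
  let u := PySem.Str.rfind name "_"
  let d := PySem.Str.rfind name "-"
  if u = -1 ∧ d = -1 then none
  else if u > d then some u else some 0

-- ===== PRECONDITION & SPEC =====
def Spec_set_underscore_position (name : String) (out : Option Int) : Prop := out = set_underscore_position_alt name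
instance (name : String) (out : Option Int) : Decidable (Spec_set_underscore_position name out) := by unfold Spec_set_underscore_position; infer_instance

-- ===== CLAIM (what is proved, stated in full; the proofs are below) =====
def Claim_equal_set_underscore_position : Prop := ∀ (name : String), Dom_set_underscore_position name → Spec_set_underscore_position name (set_underscore_position name)

-- ===== LEMMAS AND PROOFS =====

-- rfind.go on a single-char needle ignores a last element not yet reached
lemma sp_go_append (l : List Char) (c t : Char) :
    ∀ j, j < l.length → PySem.Chars.rfind.go (l ++ [c]) [t] j = PySem.Chars.rfind.go l [t] j := by
  intro j
  induction j with
  | zero =>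
      intro h
      cases l with
      | nil => simp at h
      | cons a l' => simp [PySem.Chars.rfind.go, List.isPrefixOf]
  | succ j ih =>
      intro h
      have hd : List.drop (j+1) (l ++ [c]) = List.drop (j+1) l ++ [c] :=
        List.drop_append_of_le_length (by omega)
      have hne : List.drop (j+1) l ≠ [] := by
        intro he
        have := List.drop_eq_nil_iff.mp he
        omega
      obtain ⟨a, r, hr⟩ := List.exists_cons_of_ne_nil hne
      simp only [PySem.Chars.rfind.go, hd, hr]
      simp [List.isPrefixOf]
      split_ifs
      · rfl
      · exact ih (by omega)

lemma sp_go_le (s : List Char) (t : Char) : ∀ j, PySem.Chars.rfind.go s [t] j ≤ j := by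
  intro j
  induction j with
  | zero => simp [PySem.Chars.rfind.go]; split <;> omega
  | succ j ih =>
      simp only [PySem.Chars.rfind.go]
      split
      · omega
      · omega

lemma sp_rfind_lt_length (l : List Char) (t : Char) :
    PySem.Chars.rfind l [t] < l.length := by
  unfold PySem.Chars.rfind
  cases l with
  | nil => simp [PySem.Chars.rfind.go]
  | cons a l' =>
      show PySem.Chars.rfind.go (a :: l') [t] (l'.length + 1) < _
      simp only [PySem.Chars.rfind.go]
      have : List.drop (l'.length + 1) (a :: l') = [] := by simp
      rw [this]
      simp [List.isPrefixOf]
      have := sp_go_le (a :: l') t l'.length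
      simp
      omega

lemma sp_rfind_append (l : List Char) (c t : Char) :
    PySem.Chars.rfind (l ++ [c]) [t] =
      if c = t then (l.length : Int) else PySem.Chars.rfind l [t] := by
  unfold PySem.Chars.rfind
  have hlen : (l ++ [c]).length = l.length + 1 := by simp
  rw [hlen]
  simp only [PySem.Chars.rfind.go]
  have hd1 : List.drop (l.length + 1) (l ++ [c]) = [] := by simp
  rw [hd1]
  simp only [List.isPrefixOf, Bool.false_eq_true, if_false]
  cases l with
  | nil =>
      rcases eq_or_ne c t with h | h
      · simp [PySem.Chars.rfind.go, List.isPrefixOf, h]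
      · simp [PySem.Chars.rfind.go, List.isPrefixOf, h]
        exact fun he => h he.symm
  | cons a l' =>
      show PySem.Chars.rfind.go ((a :: l') ++ [c]) [t] (l'.length + 1) = _
      simp only [PySem.Chars.rfind.go]
      have hd2 : List.drop (l'.length + 1) ((a :: l') ++ [c]) = [c] := by
        rw [List.drop_append_of_le_length (by simp)]
        simp
      rw [hd2]
      by_cases h : c = t
      · simp [List.isPrefixOf, h]
      · have : [t].isPrefixOf [c] = false := by
          simp [List.isPrefixOf]
          exact fun he => absurd he.symm h
        rw [this]
        simp only [Bool.false_eq_true, if_false, h, if_false]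
        have hstep : PySem.Chars.rfind.go ((a :: l') ++ [c]) [t] l'.length =
            PySem.Chars.rfind.go (a :: l') [t] l'.length :=
          sp_go_append (a :: l') c t l'.length (by simp)
        rw [hstep]
        show _ = PySem.Chars.rfind.go (a :: l') [t] (l'.length + 1)
        simp only [PySem.Chars.rfind.go]
        have : List.drop (l'.length + 1) (a :: l') = [] := by simp
        rw [this]
        simp [List.isPrefixOf]

-- B's decision, as a function of the character list
def spAltCore (l : List Char) : Option Int :=
  let u := PySem.Chars.rfind l ['_']
  let d := PySem.Chars.rfind l ['-']
  if u = -1 ∧ d = -1 then none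
  else if u > d then some u else some 0

lemma sp_key (l : List Char) : ∀ k : Int,
    spLoopA (k + l.length) k l.reverse = spAltCore l := by
  induction l using List.reverseRecOn with
  | nil =>
      intro k
      simp [spLoopA, spAltCore, PySem.Chars.rfind, PySem.Chars.rfind.go, List.isPrefixOf]
  | append_singleton l' c ih =>
      intro k
      rw [List.reverse_append]
      simp only [List.reverse_cons, List.reverse_nil, List.nil_append, List.singleton_append]
      have hlen : ((l' ++ [c]).length : Int) = (l'.length : Int) + 1 := by simp
      by_cases hdash : c = '-'
      · subst hdash
        have hL : spLoopA (k + ((l' ++ ['-']).length : Int)) k ('-' :: l'.reverse) = some 0 := by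
          simp [spLoopA]
        rw [hL]
        have e1 : PySem.Chars.rfind (l' ++ ['-']) ['_'] = PySem.Chars.rfind l' ['_'] := by
          rw [sp_rfind_append, if_neg (show ¬('-' : Char) = '_' by decide)]
        have e2 : PySem.Chars.rfind (l' ++ ['-']) ['-'] = (l'.length : Int) := by
          rw [sp_rfind_append, if_pos rfl]
        simp only [spAltCore, e1, e2]
        have hu := sp_rfind_lt_length l' '_'
        rw [if_neg (by rintro ⟨_, h2⟩; omega), if_neg (by omega)]
      · by_cases hund : c = '_'
        · subst hund
          have hL : spLoopA (k + ((l' ++ ['_']).length : Int)) k ('_' :: l'.reverse)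
              = some ((l'.length : Int)) := by
            simp only [spLoopA, if_neg (show ¬('_' : Char) = '-' by decide)]
            simp
          rw [hL]
          have e1 : PySem.Chars.rfind (l' ++ ['_']) ['_'] = (l'.length : Int) := by
            rw [sp_rfind_append, if_pos rfl]
          have e2 : PySem.Chars.rfind (l' ++ ['_']) ['-'] = PySem.Chars.rfind l' ['-'] := by
            rw [sp_rfind_append, if_neg (show ¬('_' : Char) = '-' by decide)]
          simp only [spAltCore, e1, e2]
          have hd := sp_rfind_lt_length l' '-'
          rw [if_neg (by rintro ⟨h1, _⟩; omega), if_pos (by omega)]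
        · have hn : k + (((l' ++ [c]).length : Int)) = (k + 1) + (l'.length : Int) := by
            simp
            ring
          have hL : spLoopA (k + ((l' ++ [c]).length : Int)) k (c :: l'.reverse)
              = spLoopA ((k + 1) + (l'.length : Int)) (k + 1) l'.reverse := by
            simp only [spLoopA, if_neg hdash, if_neg hund]
            rw [hn]
          rw [hL, ih (k + 1)]
          have e1 : PySem.Chars.rfind (l' ++ [c]) ['_'] = PySem.Chars.rfind l' ['_'] := by
            rw [sp_rfind_append, if_neg hund]
          have e2 : PySem.Chars.rfind (l' ++ [c]) ['-'] = PySem.Chars.rfind l' ['-'] := by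
            rw [sp_rfind_append, if_neg hdash]
          simp only [spAltCore, e1, e2]

-- ===== VERDICT (by name: the statement is the Claim_ definition above) =====
theorem set_underscore_position_spec : Claim_equal_set_underscore_position := by
  intro name _
  unfold Spec_set_underscore_position set_underscore_position set_underscore_position_alt
  have h := sp_key name.toList 0
  rw [zero_add] at h
  have hlen : PySem.Str.len name = (name.toList.length : Int) := by
    simp [PySem.Str.len_eq]
  rw [hlen, h]
  simp only [spAltCore, PySem.Str.rfind_eq]
  rfl
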